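-- pv_equiv track=rewrite | github.com/ccolr/Sukiyaki | Tool/surge_merge.py | sort_rules
-- ===== SOURCE A (Python) =====
-- RULE_ORDER = [
--     "SUBNET",
--     "SRC-IP",
--     "SRC-PORT",
--     "IN-PORT",
--     "DEST-PORT",
--     "PROTOCOL",
--     "PLAIN_DOMAIN",  # 纯域名 / . 开头
--     "DOMAIN",
--     "DOMAIN-SUFFIX",
--     "DOMAIN-KEYWORD",
--     "DOMAIN-WILDCARD",
--     "PROCESS-NAME",
--     "USER-AGENT",
--     "URL-REGEX",
--     "HOSTNAME-TYPE",
--     "AND",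
--     "OR",
--     "NOT",
--     "IP-CIDR",
--     "IP-CIDR6",
--     "GEOIP",
--     "IP-ASN",
-- ]
--
-- def get_rule_type(rule: str) -> str:
--     """识别规则类型（严格区分大小写）"""
--     stripped = rule.strip()
--     if not stripped:
--         return "UNKNOWN"
--     # 不含逗号，或以 "." 开头 → 纯域名
--     if "," not in stripped or stripped.startswith("."):
--         return "PLAIN_DOMAIN"
--     prefix = stripped.split(",")[0].strip()  # 不做大小写转换
--     return prefix if prefix in RULE_ORDER else "UNKNOWN"
--
-- def sort_rules(rules: list[str]) -> list[str]:
--     """按规则类型排序（no-resolve 已在 clean_rule 阶段处理，此处不再重复）"""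
--     priority = {rtype: i for i, rtype in enumerate(RULE_ORDER)}
--
--     processed = []
--     for rule in rules:
--         rtype = get_rule_type(rule)
--         processed.append((priority.get(rtype, len(RULE_ORDER)), rule))
--
--     processed.sort(key=lambda x: x[0])
--     return [rule for _, rule in processed]
-- ===== SOURCE B (Python) =====
-- RULE_ORDER = [
--     "SUBNET",
--     "SRC-IP",
--     "SRC-PORT",
--     "IN-PORT",
--     "DEST-PORT",
--     "PROTOCOL",
--     "PLAIN_DOMAIN",
--     "DOMAIN",
--     "DOMAIN-SUFFIX",
--     "DOMAIN-KEYWORD",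
--     "DOMAIN-WILDCARD",
--     "PROCESS-NAME",
--     "USER-AGENT",
--     "URL-REGEX",
--     "HOSTNAME-TYPE",
--     "AND",
--     "OR",
--     "NOT",
--     "IP-CIDR",
--     "IP-CIDR6",
--     "GEOIP",
--     "IP-ASN",
-- ]
--
-- def get_rule_type(rule: str) -> str:
--     stripped = rule.strip()
--     if not stripped:
--         return "UNKNOWN"
--     if "," not in stripped or stripped.startswith("."):
--         return "PLAIN_DOMAIN"
--     prefix = stripped.split(",")[0].strip()
--     return prefix if prefix in RULE_ORDER else "UNKNOWN"
--
-- def sort_rules(rules: list[str]) -> list[str]: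
--     """Single-pass bucket distribution by type priority instead of a comparison sort."""
--     priority = {rtype: i for i, rtype in enumerate(RULE_ORDER)}
--     buckets = [[] for _ in range(len(RULE_ORDER) + 1)]
--     for rule in rules:
--         buckets[priority.get(get_rule_type(rule), len(RULE_ORDER))].append(rule)
--     out = []
--     for bucket in buckets:
--         out.extend(bucket)
--     return out
-- ===== Notes on version B (the rewrite author's own statement) =====
-- stated objective: alternative
-- what changed: Replaces building a keyed list plus a stable comparison sort with a single-pass bucket distribution into len(RULE_ORDER)+1 lists concatenated in index order (per-bucket append preserves the stable-sort tie order).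
import Mathlib
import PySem

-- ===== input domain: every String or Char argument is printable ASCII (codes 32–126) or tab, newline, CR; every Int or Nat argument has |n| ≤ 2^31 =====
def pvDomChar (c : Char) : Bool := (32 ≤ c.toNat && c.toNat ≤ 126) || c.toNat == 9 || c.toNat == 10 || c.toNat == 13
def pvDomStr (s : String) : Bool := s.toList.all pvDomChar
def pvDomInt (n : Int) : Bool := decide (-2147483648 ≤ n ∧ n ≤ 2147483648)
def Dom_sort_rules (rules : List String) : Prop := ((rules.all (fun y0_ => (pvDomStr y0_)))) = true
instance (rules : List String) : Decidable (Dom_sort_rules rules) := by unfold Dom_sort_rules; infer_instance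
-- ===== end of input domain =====

-- B replaces A's build-pairs-then-stable-sort with a single-pass bucket distribution
-- into 23 priority buckets concatenated in index order (objective: alternative algorithm).

-- ===== PORT A =====
-- shared module constant RULE_ORDER and helper get_rule_type (identical in Source A and Source B)
def RULE_ORDER : List String :=
  ["SUBNET", "SRC-IP", "SRC-PORT", "IN-PORT", "DEST-PORT", "PROTOCOL", "PLAIN_DOMAIN",
   "DOMAIN", "DOMAIN-SUFFIX", "DOMAIN-KEYWORD", "DOMAIN-WILDCARD", "PROCESS-NAME",
   "USER-AGENT", "URL-REGEX", "HOSTNAME-TYPE", "AND", "OR", "NOT",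
   "IP-CIDR", "IP-CIDR6", "GEOIP", "IP-ASN"]

def get_rule_type (rule : String) : String :=
  let stripped := PySem.Str.strip rule
  if stripped = "" then "UNKNOWN"
  else if !(PySem.Str.isIn "," stripped) || PySem.Str.startswith stripped "." then "PLAIN_DOMAIN"
  else
    -- stripped.split(",")[0]: "," ≠ "" so split? is some, and a split list is never empty,
    -- so the [0] index never raises; headD transcribes it exactly on this domain
    let pre := PySem.Str.strip (((PySem.Str.split? stripped ",").getD []).headD "")
    if RULE_ORDER.contains pre then pre else "UNKNOWN"

-- priority = {rtype: i for i, rtype in enumerate(RULE_ORDER)}  (same comprehension in Source A and Source B)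
def priorityDict : PySem.Dict String Int :=
  (PySem.List.enumerate RULE_ORDER 0).foldl (fun d p => d.insert p.2 p.1) PySem.Dict.empty

def sort_rules (rules : List String) : List String :=
  let processed := rules.foldl
    (fun acc rule => acc ++ [(priorityDict.getD (get_rule_type rule) (RULE_ORDER.length : Int), rule)])
    ([] : List (Int × String))
  (PySem.List.sorted processed (fun p => p.1) false).map (fun p => p.2)

-- ===== PORT B =====
def sort_rules_alt (rules : List String) : List String :=
  let buckets := rules.foldl
    (fun bs rule =>
      -- buckets[priority.get(...)].append(rule); the index is a nonnegative int, toNat is exact here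
      let i := (priorityDict.getD (get_rule_type rule) (RULE_ORDER.length : Int)).toNat
      bs.set i (bs.getD i [] ++ [rule]))
    (List.replicate (RULE_ORDER.length + 1) ([] : List String))
  buckets.foldl (fun out b => out ++ b) []

-- ===== PRECONDITION & SPEC =====
def Spec_sort_rules (rules : List String) (out : List String) : Prop := out = sort_rules_alt rules
instance (rules : List String) (out : List String) : Decidable (Spec_sort_rules rules out) := by unfold Spec_sort_rules; infer_instance

-- ===== CLAIM (what is proved, stated in full; the proofs are below) =====
def Claim_equal_sort_rules : Prop := ∀ (rules : List String), Dom_sort_rules rules → Spec_sort_rules rules (sort_rules rules)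

-- ===== LEMMAS AND PROOFS =====

-- the common priority key of a rule
def rkey (r : String) : Int := priorityDict.getD (get_rule_type r) (RULE_ORDER.length : Int)

set_option maxHeartbeats 1000000 in
theorem rkey_bound (r : String) : 0 ≤ rkey r ∧ rkey r < 23 := by
  unfold rkey
  generalize get_rule_type r = s
  have hlen : (RULE_ORDER.length : Int) = 22 := by rfl
  rw [hlen, PySem.Dict.getD_eq_get?_getD]
  rcases hv : priorityDict.get? s with _ | v
  · norm_num
  · have hmem := PySem.Dict.mem_items_of_get?_eq_some priorityDict hv
    have h : priorityDict.items =
      [("SUBNET", (0:Int)), ("SRC-IP", 1), ("SRC-PORT", 2), ("IN-PORT", 3), ("DEST-PORT", 4),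
       ("PROTOCOL", 5), ("PLAIN_DOMAIN", 6), ("DOMAIN", 7), ("DOMAIN-SUFFIX", 8),
       ("DOMAIN-KEYWORD", 9), ("DOMAIN-WILDCARD", 10), ("PROCESS-NAME", 11), ("USER-AGENT", 12),
       ("URL-REGEX", 13), ("HOSTNAME-TYPE", 14), ("AND", 15), ("OR", 16), ("NOT", 17),
       ("IP-CIDR", 18), ("IP-CIDR6", 19), ("GEOIP", 20), ("IP-ASN", 21)] := by rfl
    rw [h] at hmem
    simp only [List.mem_cons, List.not_mem_nil, or_false, Prod.mk.injEq] at hmem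
    rcases hmem with (⟨-, rfl⟩|⟨-, rfl⟩|⟨-, rfl⟩|⟨-, rfl⟩|⟨-, rfl⟩|⟨-, rfl⟩|⟨-, rfl⟩|⟨-, rfl⟩|⟨-, rfl⟩|⟨-, rfl⟩|⟨-, rfl⟩|⟨-, rfl⟩|⟨-, rfl⟩|⟨-, rfl⟩|⟨-, rfl⟩|⟨-, rfl⟩|⟨-, rfl⟩|⟨-, rfl⟩|⟨-, rfl⟩|⟨-, rfl⟩|⟨-, rfl⟩|⟨-, rfl⟩) <;> norm_num

-- insertBy passes over a block of elements it is not ordered before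
theorem insertBy_append_not_before {α : Type} (before : α → α → Bool) (x : α) (L R : List α)
    (h : ∀ y ∈ L, before x y = false) :
    PySem.List.insertBy before x (L ++ R) = L ++ PySem.List.insertBy before x R := by
  induction L with
  | nil => rfl
  | cons y ys ih =>
      simp only [List.cons_append, PySem.List.insertBy, h y (by simp)]
      simp only [Bool.false_eq_true, if_false, List.cons.injEq, true_and]
      exact ih (fun z hz => h z (by simp [hz]))

-- insertBy lands at the head of a block it is ordered before
theorem insertBy_all_before {α : Type} (before : α → α → Bool) (x : α) (R : List α)
    (h : ∀ y ∈ R, before x y = true) :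
    PySem.List.insertBy before x R = x :: R := by
  cases R with
  | nil => rfl
  | cons y ys => simp [PySem.List.insertBy, h y (by simp)]

theorem flatMap_congr' {α β : Type} (l : List α) (f g : α → List β)
    (h : ∀ a ∈ l, f a = g a) : l.flatMap f = l.flatMap g := by
  induction l with
  | nil => rfl
  | cons a t ih => simp [List.flatMap_cons, h a (by simp), ih (fun b hb => h b (by simp [hb]))]

-- A stable sort on small-integer keys is the concatenation of the key buckets in key order.
theorem sorted_eq_flatMap_filter {α : Type} (key : α → Int) (N : Nat) (xs : List α)
    (h : ∀ x ∈ xs, 0 ≤ key x ∧ key x < N) :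
    PySem.List.sorted xs key false
      = (List.range N).flatMap (fun (i : Nat) => xs.filter (fun x => key x = (i : Int))) := by
  rw [PySem.List.sorted_eq_foldl_insertBy]
  induction xs using List.reverseRecOn with
  | nil => simp
  | append_singleton xs x ih =>
      have hx := h x (by simp)
      have hxs : ∀ y ∈ xs, 0 ≤ key y ∧ key y < N := fun y hy => h y (by simp [hy])
      rw [List.foldl_append, List.foldl_cons, List.foldl_nil, ih hxs]
      set m : Nat := (key x).toNat with hm
      have hkx : key x = (m : Int) := by omega
      have hmN : m + 1 ≤ N := by omega
      have hsplit : List.range N = List.range (m + 1) ++ (List.range (N - (m + 1))).map (· + (m + 1)) := by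
        have : N = (m + 1) + (N - (m + 1)) := by omega
        rw [this, List.range_add]
        simp [Nat.add_comm]
      rw [hsplit, List.flatMap_append, List.flatMap_append]
      have hL : ∀ y ∈ (List.range (m + 1)).flatMap (fun (i : Nat) => xs.filter (fun z => key z = (i : Int))),
          decide (key x < key y) = false := by
        intro y hy
        simp only [List.mem_flatMap, List.mem_range, List.mem_filter] at hy
        obtain ⟨i, hi, _, hk⟩ := hy
        have : key y = (i : Int) := by simpa using hk
        simp only [decide_eq_false_iff_not, not_lt, this, hkx]
        exact_mod_cast Nat.le_of_lt_succ hi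
      have hR : ∀ y ∈ ((List.range (N - (m + 1))).map (· + (m + 1))).flatMap
            (fun (i : Nat) => xs.filter (fun z => key z = (i : Int))),
          decide (key x < key y) = true := by
        intro y hy
        simp only [List.mem_flatMap, List.mem_map, List.mem_range, List.mem_filter] at hy
        obtain ⟨i, ⟨j, _, rfl⟩, _, hk⟩ := hy
        have : key y = ((j + (m + 1) : Nat) : Int) := by simpa using hk
        simp only [decide_eq_true_eq, this, hkx]
        push_cast
        omega
      rw [insertBy_append_not_before _ _ _ _ hL, insertBy_all_before _ _ _ hR]
      -- right block: x does not belong to any bucket above m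
      have hRblock : ((List.range (N - (m + 1))).map (· + (m + 1))).flatMap
            (fun (i : Nat) => (xs ++ [x]).filter (fun z => key z = (i : Int)))
          = ((List.range (N - (m + 1))).map (· + (m + 1))).flatMap
            (fun (i : Nat) => xs.filter (fun z => key z = (i : Int))) := by
        apply flatMap_congr'
        intro i hi
        simp only [List.mem_map, List.mem_range] at hi
        obtain ⟨j, _, rfl⟩ := hi
        rw [List.filter_append]
        have hne : ¬ key x = ((j : Int) + ((m : Int) + 1)) := by rw [hkx]; omega
        simp [hne]
      -- left block: x lands at the end of bucket m
      have hLblock : (List.range (m + 1)).flatMap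
            (fun (i : Nat) => (xs ++ [x]).filter (fun z => key z = (i : Int)))
          = ((List.range (m + 1)).flatMap (fun (i : Nat) => xs.filter (fun z => key z = (i : Int)))) ++ [x] := by
        rw [List.range_succ, List.flatMap_append, List.flatMap_append]
        have h1 : (List.range m).flatMap (fun (i : Nat) => (xs ++ [x]).filter (fun z => key z = (i : Int)))
            = (List.range m).flatMap (fun (i : Nat) => xs.filter (fun z => key z = (i : Int))) := by
          apply flatMap_congr'
          intro i hi
          simp only [List.mem_range] at hi
          rw [List.filter_append]
          have hne : ¬ key x = (i : Int) := by
            rw [hkx]; intro hc; have : m = i := by exact_mod_cast hc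
            omega
          simp [hne]
        rw [h1]
        simp [List.filter_append, hkx]
      rw [hRblock, hLblock]
      simp

theorem map_range_getD {α : Type} (l : List α) (d : α) :
    (List.range l.length).map (fun i => l.getD i d) = l := by
  apply List.ext_getElem (by simp)
  intro i h1 h2
  simp only [List.getElem_map, List.getElem_range, List.getD_eq_getElem?_getD]
  rw [List.getElem?_eq_getElem h2]
  rfl

-- the bucket-distribution loop of B, characterised bucket by bucket
theorem buckets_foldl {α : Type} (idx : α → Nat) (xs : List α) :
    ∀ (bs : List (List α)), (∀ r ∈ xs, idx r < bs.length) →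
    xs.foldl (fun bs r => bs.set (idx r) (bs.getD (idx r) [] ++ [r])) bs
      = (List.range bs.length).map (fun i => bs.getD i [] ++ xs.filter (fun r => idx r = i)) := by
  induction xs with
  | nil =>
      intro bs _
      simp only [List.foldl_nil, List.filter_nil, List.append_nil]
      exact (map_range_getD bs []).symm
  | cons x t ih =>
      intro bs hb
      have hx : idx x < bs.length := hb x (by simp)
      rw [List.foldl_cons]
      rw [ih _ (by intro r hr; rw [List.length_set]; exact hb r (by simp [hr]))]
      rw [List.length_set]
      apply List.map_congr_left
      intro i hi
      simp only [List.mem_range] at hi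
      by_cases hij : i = idx x
      · subst hij
        simp [List.getD_eq_getElem?_getD, List.getElem?_set_self (by omega)]
      · have : (bs.set (idx x) (bs.getD (idx x) [] ++ [x])).getD i [] = bs.getD i [] := by
          simp only [List.getD_eq_getElem?_getD]
          rw [List.getElem?_set_ne (by omega)]
        rw [this, List.filter_cons]
        have : ¬ (idx x = i) := fun h => hij h.symm
        simp [this]

-- ===== VERDICT (by name: the statement is the Claim_ definition above) =====
theorem sort_rules_spec : Claim_equal_sort_rules := by
  intro rules _
  unfold Spec_sort_rules sort_rules sort_rules_alt
  dsimp only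
  -- A side: the pair-building loop is a map, then the stable sort is the bucket concatenation
  rw [PySem.List.foldl_append_singleton_eq_map]
  rw [sorted_eq_flatMap_filter (α := Int × String) (fun p => p.1) 23 _
    (by
      intro p hp
      simp only [List.nil_append, List.mem_map] at hp
      obtain ⟨r, _, rfl⟩ := hp
      exact rkey_bound r)]
  rw [List.map_flatMap]
  -- B side: the distribution loop, bucket by bucket, then the concatenation loop
  have hlen : RULE_ORDER.length + 1 = 23 := by rfl
  rw [hlen]
  rw [buckets_foldl (fun rule => (priorityDict.getD (get_rule_type rule) (RULE_ORDER.length : Int)).toNat) rules (List.replicate 23 [])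
    (by intro r _; have := rkey_bound r; simp only [rkey] at this; simp only [List.length_replicate]; omega)]
  rw [List.length_replicate]
  rw [PySem.List.foldl_append_eq_flatMap]
  simp only [List.nil_append, List.flatMap_map]
  apply flatMap_congr'
  intro i hi
  simp only [List.mem_range] at hi
  have hb : (List.replicate 23 ([] : List String)).getD i [] = [] := by
    interval_cases i <;> rfl
  rw [hb, List.nil_append]
  rw [List.filter_map]
  have hcomp : ((fun p : Int × String => p.2) ∘
      (fun r : String => (priorityDict.getD (get_rule_type r) (RULE_ORDER.length : Int), r))) = id := rfl
  rw [List.map_map, hcomp, List.map_id]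
  apply List.filter_congr
  intro r _
  have hbnd := rkey_bound r
  simp only [rkey] at hbnd
  simp only [Function.comp]
  have : ((priorityDict.getD (get_rule_type r) (RULE_ORDER.length : Int) = (i : Int))) ↔
      ((priorityDict.getD (get_rule_type r) (RULE_ORDER.length : Int)).toNat = i) := by omega
  simp [this]
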